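-- pv_equiv track=rewrite | github.com/djole103/algo | python/round2/kUniqSubarray.py | BrF
-- ===== SOURCE A (Python) =====
-- def BrF(nums):
--         k = 0
--         bestLength = 99999
--         bestS = 0
--         bestE = 0
--         while(k+2 < len(nums)):
--                 d = {}
--                 start = -1
--                 end = -1
--                 count = 0
--                 for i in range(k, len(nums)):
--                         if nums[i] not in d:
--                                 count += 1
--                                 d[nums[i]] = True
--                                 if start == -1:
--                                         start = i
--                                 elif count == 3:
--                                         end = i
--                                         break
--                 if (end != -1) and (end - start < bestLength):
--                         bestLength = end - start
--                         bestS = start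
--                         bestE = end
--                 k += 1
--         return bestLength + 1
-- ===== SOURCE B (Python) =====
-- def BrF(nums):
--     # Single pass: for each index i keep a = last index left of i whose value
--     # differs from nums[i], and b = last index left of a whose value differs
--     # from both nums[i] and nums[a]; then [b, i] is the shortest window with
--     # 3 distinct values ending at i. 100000 = "no window" (the original's cap).
--     best = 100000
--     a = -1
--     b = -1
--     for i in range(1, len(nums)):
--         if nums[i] != nums[i - 1]:
--             if a == -1 or nums[i] != nums[a]:
--                 b = a
--             a = i - 1
--         if b != -1 and i - b + 1 < best:
--             best = i - b + 1
--     return best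
-- ===== Notes on version B (the rewrite author's own statement) =====
-- stated objective: faster
-- what changed: Replaced the per-start rescan (a fresh dict-based scan from every k until a 3rd distinct value appears) by a single left-to-right pass that maintains two indices: the last position whose value differs from the current one, and the last position whose value differs from both; each step yields the shortest 3-distinct window ending there.
import Mathlib
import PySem

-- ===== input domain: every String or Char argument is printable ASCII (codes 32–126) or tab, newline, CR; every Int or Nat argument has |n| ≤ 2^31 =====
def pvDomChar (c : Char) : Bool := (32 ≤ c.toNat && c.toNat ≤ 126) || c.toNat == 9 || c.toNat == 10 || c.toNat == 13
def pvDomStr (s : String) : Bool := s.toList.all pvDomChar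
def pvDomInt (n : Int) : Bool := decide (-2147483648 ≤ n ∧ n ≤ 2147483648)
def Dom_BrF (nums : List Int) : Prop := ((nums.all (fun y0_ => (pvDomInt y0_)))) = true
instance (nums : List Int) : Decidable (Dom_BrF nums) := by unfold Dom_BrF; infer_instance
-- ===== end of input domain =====

-- B replaces A's per-start rescan by one left-to-right pass keeping two lagging indices;
-- return values agree on every input (A does not mutate its argument).

-- ===== PORT A =====
-- inner 'for i in range(k, len(nums))' loop of A, with its break;
-- indices produced by range(k, len(nums)) with 0 ≤ k are in range, so pyGetD is exact here
def BrF_inner (nums : List Int) : List Int → PySem.Dict Int Bool → Int → Int → Int → Int × Int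
  | [], _, _, start, stop => (start, stop)
  | i :: is, d, count, start, stop =>
    let x := PySem.List.pyGetD nums i 0
    if d.contains x = false then
      if start = -1 then BrF_inner nums is (d.insert x true) (count + 1) i stop
      else if count + 1 = 3 then (start, i)
      else BrF_inner nums is (d.insert x true) (count + 1) start stop
    else BrF_inner nums is d count start stop

-- the 'while k+2 < len(nums)' loop of A (bestS/bestE kept, as in A, though unused in the result)
def BrF_outer (nums : List Int) (k bestLength bestS bestE : Int) : Int :=
  if k + 2 < (nums.length : Int) then
    let r := BrF_inner nums (PySem.List.pyRange k (nums.length : Int) 1) PySem.Dict.empty 0 (-1) (-1)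
    if r.2 ≠ -1 ∧ r.2 - r.1 < bestLength then
      BrF_outer nums (k + 1) (r.2 - r.1) r.1 r.2
    else
      BrF_outer nums (k + 1) bestLength bestS bestE
  else bestLength + 1
termination_by ((nums.length : Int) + 2 - k).toNat
decreasing_by all_goals omega

def BrF (nums : List Int) : Int := BrF_outer nums 0 99999 0 0

-- ===== PORT B =====
-- one iteration of B's single 'for i in range(1, len(nums))' loop; state = (best, a, b)
def BrF_step (nums : List Int) (s : Int × Int × Int) (i : Int) : Int × Int × Int :=
  let best := s.1
  let a := s.2.1
  let b := s.2.2
  let b' := if PySem.List.pyGetD nums i 0 ≠ PySem.List.pyGetD nums (i - 1) 0 then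
              (if a = -1 ∨ PySem.List.pyGetD nums i 0 ≠ PySem.List.pyGetD nums a 0 then a else b)
            else b
  let a' := if PySem.List.pyGetD nums i 0 ≠ PySem.List.pyGetD nums (i - 1) 0 then i - 1 else a
  let best' := if b' ≠ -1 ∧ i - b' + 1 < best then i - b' + 1 else best
  (best', a', b')

def BrF_alt (nums : List Int) : Int :=
  ((PySem.List.pyRange 1 (nums.length : Int) 1).foldl (BrF_step nums) (100000, -1, -1)).1

-- ===== PRECONDITION & SPEC =====
def Spec_BrF (nums : List Int) (out : Int) : Prop := out = BrF_alt nums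
instance (nums : List Int) (out : Int) : Decidable (Spec_BrF nums out) := by unfold Spec_BrF; infer_instance

-- ===== CLAIM (what is proved, stated in full; the proofs are below) =====
def Claim_equal_BrF : Prop := ∀ (nums : List Int), Dom_BrF nums → Spec_BrF nums (BrF nums)

-- ===== LEMMAS AND PROOFS =====

-- ---------- A-side specification: first index reaching a third distinct value ----------

-- offset (within l) of the first element completing three distinct values, given the ≤2 values seen so far
def pvFirst (seen : List Int) : List Int → Option ℕ
  | [] => none
  | x :: xs =>
    if x ∈ seen then (pvFirst seen xs).map (· + 1)
    else if seen.length = 2 then some 0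
    else (pvFirst (seen ++ [x]) xs).map (· + 1)

-- absolute index of the end of A's window scanned from start k
def pvMu (nums : List Int) (k : ℕ) : Option ℕ :=
  (pvFirst [nums.getD k 0] (nums.drop (k + 1))).map (fun e => k + 1 + e)

def pvCandA (nums : List Int) (j : ℕ) : Option Int := (pvMu nums j).map (fun E => (E : Int) - j)

-- ---------- B-side specification: the (a, b) pointer pair as a pure function of the prefix ----------

def pvAbv (nums : List Int) (p : Int × Int) (e : ℕ) : Int × Int :=
  if nums.getD (e + 1) 0 ≠ nums.getD e 0 then
    ((e : Int), if p.1 = -1 ∨ nums.getD (e + 1) 0 ≠ PySem.List.pyGetD nums p.1 0 then p.1 else p.2)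
  else p

def pvAb (nums : List Int) : ℕ → Int × Int
  | 0 => (-1, -1)
  | e + 1 => pvAbv nums (pvAb nums e) e

def pvCandB (nums : List Int) (e : ℕ) : Option Int :=
  if (pvAb nums e).2 = -1 then none else some ((e : Int) - (pvAb nums e).2 + 1)

-- ---------- shared "running minimum over optional candidates" fold ----------

def pvCMin (c : ℕ → Option Int) (acc : Int) (j : ℕ) : Int :=
  match c j with
  | some v => if v < acc then v else acc
  | none => acc

theorem pv_cmin_le_self (c : ℕ → Option Int) (a : Int) (x : ℕ) : pvCMin c a x ≤ a := by
  rcases hcx : c x with _ | v <;> simp [pvCMin, hcx] <;> split <;> omega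

theorem pv_cmin_le_start (c : ℕ → Option Int) (l : List ℕ) (a : Int) :
    l.foldl (pvCMin c) a ≤ a := by
  induction l generalizing a with
  | nil => simp
  | cons x t ih => exact le_trans (ih (pvCMin c a x)) (pv_cmin_le_self c a x)

theorem pv_cmin_le_cand (c : ℕ → Option Int) (l : List ℕ) (a : Int) (j : ℕ) (v : Int)
    (hj : j ∈ l) (hc : c j = some v) : l.foldl (pvCMin c) a ≤ v := by
  induction l generalizing a with
  | nil => simp at hj
  | cons x t ih =>
    rcases List.mem_cons.1 hj with rfl | hmem
    · refine le_trans (pv_cmin_le_start c t _) ?_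
      simp [pvCMin, hc]; split <;> omega
    · exact ih _ hmem

theorem pv_cmin_attained (c : ℕ → Option Int) (l : List ℕ) (a : Int) :
    l.foldl (pvCMin c) a = a ∨ ∃ j ∈ l, ∃ v, c j = some v ∧ l.foldl (pvCMin c) a = v := by
  induction l generalizing a with
  | nil => left; simp
  | cons x t ih =>
    simp only [List.foldl_cons]
    rcases ih (pvCMin c a x) with h | ⟨j, hj, v, hc, hv⟩
    · rw [h]
      rcases hcx : c x with _ | w
      · left; simp [pvCMin, hcx]
      · by_cases hlt : w < a
        · right
          exact ⟨x, List.mem_cons_self, w, hcx, by simp [pvCMin, hcx, hlt]⟩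
        · left; simp [pvCMin, hcx, hlt]
    · right; exact ⟨j, List.mem_cons_of_mem _ hj, v, hc, hv⟩

-- ---------- characterization of port A ----------

theorem pv_inner_phase2 (nums : List Int) :
    ∀ (c i : ℕ) (seen : List Int) (d : PySem.Dict Int Bool) (start : Int),
    nums.length = i + c →
    (∀ x : Int, d.contains x = decide (x ∈ seen)) →
    seen.length ≤ 2 → 1 ≤ seen.length → start ≠ -1 →
    BrF_inner nums (PySem.List.pyRange (i : Int) (nums.length : Int) 1) d (seen.length : Int) start (-1)
      = (start, match pvFirst seen (nums.drop i) with
                | some e => ((i + e : ℕ) : Int)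
                | none => -1) := by
  intro c
  induction c with
  | zero =>
    intro i seen d start hlen hcont h2 h1 hs
    rw [PySem.List.pyRange_one_eq_nil (by omega)]
    have hdrop : nums.drop i = [] := List.drop_eq_nil_of_le (by omega)
    rw [hdrop]
    rfl
  | succ c ih =>
    intro i seen d start hlen hcont h2 h1 hs
    have hi : (i : Int) < (nums.length : Int) := by omega
    have hidx : i < nums.length := by omega
    rw [PySem.List.pyRange_one_cons hi]
    have hcast : (i : Int) + 1 = ((i + 1 : ℕ) : Int) := by push_cast; ring
    have hdrop : nums.drop i = nums.getD i 0 :: nums.drop (i + 1) := by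
      rw [List.getD_eq_getElem _ _ hidx]
      exact List.drop_eq_getElem_cons hidx
    simp only [BrF_inner, PySem.List.pyGetD_natCast, hcast]
    rw [hcont (nums.getD i 0)]
    by_cases hmem : nums.getD i 0 ∈ seen
    · rw [if_neg (by rw [decide_eq_true hmem]; simp)]
      rw [ih (i + 1) seen d start (by omega) hcont h2 h1 hs]
      rw [hdrop]
      simp only [pvFirst, if_pos hmem]
      cases pvFirst seen (nums.drop (i + 1)) with
      | none => rfl
      | some e =>
        simp only [Option.map_some]
        have harith : i + 1 + e = i + (e + 1) := by omega
        rw [harith]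
    · rw [if_pos (decide_eq_false hmem)]
      rw [if_neg hs]
      rw [hdrop]
      simp only [pvFirst, if_neg hmem]
      by_cases hlen2 : seen.length = 2
      · rw [if_pos (by omega : ((seen.length : ℕ) : Int) + 1 = 3), if_pos hlen2]
        simp
      · rw [if_neg (by omega : ¬ ((seen.length : ℕ) : Int) + 1 = 3), if_neg hlen2]
        have hccast : ((seen.length : ℕ) : Int) + 1 = (((seen ++ [nums.getD i 0]).length : ℕ) : Int) := by
          simp
        rw [hccast]
        have hcont' : ∀ y : Int, (d.insert (nums.getD i 0) true).contains y
            = decide (y ∈ seen ++ [nums.getD i 0]) := by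
          intro y
          rw [PySem.Dict.contains_insert, hcont y]
          generalize nums.getD i 0 = z
          by_cases hy : y = z
          · simp [hy]
          · simp [hy]
        rw [ih (i + 1) (seen ++ [nums.getD i 0]) (d.insert (nums.getD i 0) true) start
          (by omega) hcont' (by simp; omega) (by simp) hs]
        cases pvFirst (seen ++ [nums.getD i 0]) (nums.drop (i + 1)) with
        | none => rfl
        | some e =>
        simp only [Option.map_some]
        have harith : i + 1 + e = i + (e + 1) := by omega
        rw [harith]

theorem pv_inner_start (nums : List Int) (k : ℕ) (hk : k < nums.length) :
    BrF_inner nums (PySem.List.pyRange (k : Int) (nums.length : Int) 1) PySem.Dict.empty 0 (-1) (-1)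
      = ((k : Int), match pvMu nums k with | some E => (E : Int) | none => -1) := by
  have hi : (k : Int) < (nums.length : Int) := by exact_mod_cast hk
  rw [PySem.List.pyRange_one_cons hi]
  simp only [BrF_inner, PySem.List.pyGetD_natCast, PySem.Dict.contains_empty]
  rw [if_pos trivial, if_pos trivial]
  have hcast : (k : Int) + 1 = ((k + 1 : ℕ) : Int) := by push_cast; ring
  have h01 : (0 : Int) + 1 = (([nums.getD k 0].length : ℕ) : Int) := by simp
  rw [hcast, h01]
  have hcontins : ∀ y : Int,
      ((PySem.Dict.empty : PySem.Dict Int Bool).insert (nums.getD k 0) true).contains y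
        = decide (y ∈ [nums.getD k 0]) := by
    intro y
    rw [PySem.Dict.contains_insert, PySem.Dict.contains_empty]
    generalize nums.getD k 0 = z
    by_cases hy : y = z
    · simp [hy]
    · simp [hy]
  rw [pv_inner_phase2 nums (nums.length - (k + 1)) (k + 1) [nums.getD k 0] _ _
    (by omega) hcontins (by simp) (by simp) (by omega)]
  unfold pvMu
  cases pvFirst [nums.getD k 0] (nums.drop (k + 1)) with
  | none => rfl
  | some e => rfl

theorem pv_outer (nums : List Int) :
    ∀ (c k : ℕ) (best bs be : Int), nums.length ≤ k + 2 + c →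
    BrF_outer nums (k : Int) best bs be
      = (List.range' k (nums.length - 2 - k)).foldl (pvCMin (pvCandA nums)) best + 1 := by
  intro c
  induction c with
  | zero =>
    intro k best bs be hle
    rw [BrF_outer, if_neg (by omega : ¬ ((k : Int) + 2 < (nums.length : Int)))]
    have h0 : nums.length - 2 - k = 0 := by omega
    rw [h0]; rfl
  | succ c ih =>
    intro k best bs be hle
    by_cases hcond : (k : Int) + 2 < (nums.length : Int)
    · rw [BrF_outer, if_pos hcond]
      have hk : k < nums.length := by omega
      simp only [pv_inner_start nums k hk]
      have hrange : List.range' k (nums.length - 2 - k)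
          = k :: List.range' (k + 1) (nums.length - 2 - (k + 1)) := by
        have hc : nums.length - 2 - k = (nums.length - 2 - (k + 1)) + 1 := by omega
        rw [hc, List.range'_succ]
      rw [hrange]
      simp only [List.foldl_cons]
      have hcast : (k : Int) + 1 = ((k + 1 : ℕ) : Int) := by push_cast; ring
      cases hmu : pvMu nums k with
      | none =>
        rw [if_neg (by simp)]
        rw [hcast, ih (k + 1) best bs be (by omega)]
        congr 1
        simp [pvCMin, pvCandA, hmu]
      | some E =>
        by_cases hlt : (E : Int) - (k : Int) < best
        · rw [if_pos (by refine ⟨?_, ?_⟩ <;> simp <;> omega)]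
          rw [hcast, ih (k + 1) ((E : Int) - (k : Int)) (k : Int) (E : Int) (by omega)]
          congr 1
          simp [pvCMin, pvCandA, hmu, hlt]
        · rw [if_neg (by intro hh; exact hlt (by simpa using hh.2))]
          rw [hcast, ih (k + 1) best bs be (by omega)]
          congr 1
          simp [pvCMin, pvCandA, hmu, hlt]
    · rw [BrF_outer, if_neg hcond]
      have h0 : nums.length - 2 - k = 0 := by omega
      rw [h0]; rfl

theorem pv_A_char (nums : List Int) :
    BrF nums = (List.range' 0 (nums.length - 2)).foldl (pvCMin (pvCandA nums)) 99999 + 1 := by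
  have h := pv_outer nums nums.length 0 99999 0 0 (by omega)
  simpa using h

-- ---------- characterization of port B ----------

theorem pv_best_eq (nums : List Int) (best : Int) (m : ℕ) (b' : Int)
    (hb : (pvAb nums (m + 1)).2 = b') :
    (if b' ≠ -1 ∧ ((m + 1 : ℕ) : Int) - b' + 1 < best then ((m + 1 : ℕ) : Int) - b' + 1 else best)
      = pvCMin (pvCandB nums) best (m + 1) := by
  unfold pvCMin pvCandB
  rw [hb]
  by_cases h : b' = -1
  · simp [h]
  · by_cases hlt : ((m + 1 : ℕ) : Int) - b' + 1 < best
    · simp [h, hlt]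
    · simp [h, hlt]

theorem pv_step_eq (nums : List Int) (best : Int) (m : ℕ) :
    BrF_step nums (best, pvAb nums m) ((m + 1 : ℕ) : Int)
      = (pvCMin (pvCandB nums) best (m + 1), pvAb nums (m + 1)) := by
  have hsub : ((m + 1 : ℕ) : Int) - 1 = ((m : ℕ) : Int) := by push_cast; ring
  unfold BrF_step
  simp only [hsub, PySem.List.pyGetD_natCast]
  by_cases h1 : nums.getD (m + 1) 0 ≠ nums.getD m 0
  · by_cases h2 : (pvAb nums m).1 = -1 ∨ nums.getD (m + 1) 0 ≠ PySem.List.pyGetD nums (pvAb nums m).1 0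
    · have hab : pvAb nums (m + 1) = (((m : ℕ) : Int), (pvAb nums m).1) := by
        show pvAbv nums (pvAb nums m) m = _
        unfold pvAbv; rw [if_pos h1, if_pos h2]
      simp only [if_pos h1, if_pos h2]
      rw [hab]
      have hb : (pvAb nums (m + 1)).2 = (pvAb nums m).1 := by rw [hab]
      rw [← pv_best_eq nums best m (pvAb nums m).1 hb]
    · have hab : pvAb nums (m + 1) = (((m : ℕ) : Int), (pvAb nums m).2) := by
        show pvAbv nums (pvAb nums m) m = _
        unfold pvAbv; rw [if_pos h1, if_neg h2]
      simp only [if_pos h1, if_neg h2]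
      rw [hab]
      have hb : (pvAb nums (m + 1)).2 = (pvAb nums m).2 := by rw [hab]
      rw [← pv_best_eq nums best m (pvAb nums m).2 hb]
  · have hab : pvAb nums (m + 1) = pvAb nums m := by
      show pvAbv nums (pvAb nums m) m = _
      unfold pvAbv; rw [if_neg h1]
    simp only [if_neg h1]
    rw [hab]
    have hb : (pvAb nums (m + 1)).2 = (pvAb nums m).2 := by rw [hab]
    rw [← pv_best_eq nums best m (pvAb nums m).2 hb]

theorem pv_alt_fold (nums : List Int) (m : ℕ) :
    (PySem.List.pyRange 1 ((m + 1 : ℕ) : Int) 1).foldl (BrF_step nums) (100000, -1, -1)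
      = ((List.range' 1 m).foldl (pvCMin (pvCandB nums)) 100000, pvAb nums m) := by
  induction m with
  | zero =>
    rw [PySem.List.pyRange_one_eq_nil (by norm_num)]
    rfl
  | succ m ih =>
    have hsplit : PySem.List.pyRange 1 ((m + 1 + 1 : ℕ) : Int) 1
        = PySem.List.pyRange 1 ((m + 1 : ℕ) : Int) 1 ++ [((m + 1 : ℕ) : Int)] := by
      have h1 : ((m + 1 + 1 : ℕ) : Int) = ((m + 1 : ℕ) : Int) + 1 := by push_cast; ring
      rw [h1, PySem.List.pyRange_one_succ_right (by push_cast; omega)]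
    rw [hsplit, List.foldl_append, ih]
    simp only [List.foldl_cons, List.foldl_nil]
    rw [List.range'_concat, List.foldl_append]
    simp only [List.foldl_cons, List.foldl_nil]
    have hc : 1 + 1 * m = m + 1 := by ring
    rw [hc]
    exact pv_step_eq nums _ m

theorem pv_B_char (nums : List Int) :
    BrF_alt nums = (List.range' 1 (nums.length - 1)).foldl (pvCMin (pvCandB nums)) 100000 := by
  unfold BrF_alt
  cases h : nums.length with
  | zero =>
    rw [PySem.List.pyRange_one_eq_nil (by norm_num)]
    rfl
  | succ m =>
    rw [pv_alt_fold nums m]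
    simp

-- ---------- invariants of the (a, b) pointers ----------

theorem pv_ab_inv (nums : List Int) (e : ℕ) :
    ((pvAb nums e).1 = -1 ∨ ∃ ja : ℕ, (pvAb nums e).1 = (ja : Int) ∧ ja < e ∧ nums.getD ja 0 ≠ nums.getD e 0)
    ∧ (∀ j : ℕ, (pvAb nums e).1 < (j : Int) → j < e → nums.getD j 0 = nums.getD e 0)
    ∧ ((pvAb nums e).2 = -1 ∨ ∃ jb ja : ℕ, (pvAb nums e).1 = (ja : Int) ∧ (pvAb nums e).2 = (jb : Int)
        ∧ jb < ja ∧ nums.getD jb 0 ≠ nums.getD e 0 ∧ nums.getD jb 0 ≠ nums.getD ja 0)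
    ∧ (∀ j ja : ℕ, (pvAb nums e).1 = (ja : Int) → (pvAb nums e).2 < (j : Int) → j < ja →
        (nums.getD j 0 = nums.getD e 0 ∨ nums.getD j 0 = nums.getD ja 0)) := by
  induction e with
  | zero =>
    refine ⟨Or.inl rfl, ?_, Or.inl rfl, ?_⟩
    · intro j hj hje; exact absurd hje (by omega)
    · intro j ja hja hb hjlt
      exfalso
      have h0 : (pvAb nums 0).1 = -1 := rfl
      rw [h0] at hja; omega
  | succ e ih =>
    obtain ⟨ih1, ih2, ih3, ih4⟩ := ih
    have hstep : pvAb nums (e + 1) = pvAbv nums (pvAb nums e) e := rfl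
    by_cases h1 : nums.getD (e + 1) 0 ≠ nums.getD e 0
    · by_cases h2 : (pvAb nums e).1 = -1 ∨ nums.getD (e + 1) 0 ≠ PySem.List.pyGetD nums (pvAb nums e).1 0
      · have ha' : (pvAb nums (e + 1)).1 = (e : Int) := by
          rw [hstep]; unfold pvAbv; rw [if_pos h1, if_pos h2]
        have hb' : (pvAb nums (e + 1)).2 = (pvAb nums e).1 := by
          rw [hstep]; unfold pvAbv; rw [if_pos h1, if_pos h2]
        refine ⟨Or.inr ⟨e, ha', by omega, fun hh => h1 hh.symm⟩, ?_, ?_, ?_⟩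
        · intro j hj hje; rw [ha'] at hj; exfalso; omega
        · rw [hb', ha']
          by_cases hp1 : (pvAb nums e).1 = -1
          · exact Or.inl hp1
          · rcases ih1 with h | ⟨ja0, hja0, hlt0, hne0⟩
            · exact absurd h hp1
            rcases h2 with h2a | h2b
            · exact absurd h2a hp1
            rw [hja0, PySem.List.pyGetD_natCast] at h2b
            exact Or.inr ⟨ja0, e, rfl, hja0, hlt0, fun hh => h2b hh.symm, hne0⟩
        · intro j ja hja hb hjlt
          rw [ha'] at hja; rw [hb'] at hb
          have hjae : ja = e := by exact_mod_cast hja.symm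
          subst hjae
          exact Or.inr (ih2 j hb hjlt)
      · push_neg at h2
        obtain ⟨hp1, hveq0⟩ := h2
        rcases ih1 with h | ⟨ja0, hja0, hlt0, hne0⟩
        · exact absurd h hp1
        have hcond : ¬((pvAb nums e).1 = -1 ∨ nums.getD (e + 1) 0 ≠ PySem.List.pyGetD nums (pvAb nums e).1 0) := by
          push_neg; exact ⟨hp1, hveq0⟩
        rw [hja0, PySem.List.pyGetD_natCast] at hveq0
        have ha' : (pvAb nums (e + 1)).1 = (e : Int) := by
          rw [hstep]; unfold pvAbv; rw [if_pos h1, if_neg hcond]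
        have hb' : (pvAb nums (e + 1)).2 = (pvAb nums e).2 := by
          rw [hstep]; unfold pvAbv; rw [if_pos h1, if_neg hcond]
        refine ⟨Or.inr ⟨e, ha', by omega, fun hh => h1 hh.symm⟩, ?_, ?_, ?_⟩
        · intro j hj hje; rw [ha'] at hj; exfalso; omega
        · rw [hb', ha']
          rcases ih3 with h | ⟨jb0, ja0', hja0', hjb0, hlt3, hne3a, hne3b⟩
          · exact Or.inl h
          have hjaeq : ja0' = ja0 := by exact_mod_cast hja0'.symm.trans hja0
          subst hjaeq
          exact Or.inr ⟨jb0, e, rfl, hjb0, by omega, by rw [hveq0]; exact hne3b, hne3a⟩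
        · intro j ja hja hb hjlt
          rw [ha'] at hja; rw [hb'] at hb
          have hjae : ja = e := by exact_mod_cast hja.symm
          subst hjae
          rcases Nat.lt_trichotomy j ja0 with hlt' | heq | hgt
          · rcases ih4 j ja0 hja0 hb hlt' with hvv | hvv
            · exact Or.inr hvv
            · exact Or.inl (by rw [hvv, hveq0])
          · subst heq
            exact Or.inl hveq0.symm
          · exact Or.inr (ih2 j (by rw [hja0]; exact_mod_cast hgt) hjlt)
    · have hv : nums.getD (e + 1) 0 = nums.getD e 0 := not_ne_iff.1 h1
      have ha' : (pvAb nums (e + 1)).1 = (pvAb nums e).1 := by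
        rw [hstep]; unfold pvAbv; rw [if_neg h1]
      have hb' : (pvAb nums (e + 1)).2 = (pvAb nums e).2 := by
        rw [hstep]; unfold pvAbv; rw [if_neg h1]
      refine ⟨?_, ?_, ?_, ?_⟩
      · rw [ha', hv]
        rcases ih1 with h | ⟨ja0, hja0, hlt0, hne0⟩
        · exact Or.inl h
        · exact Or.inr ⟨ja0, hja0, by omega, hne0⟩
      · intro j hj hje
        rw [ha'] at hj; rw [hv]
        rcases Nat.lt_or_ge j e with hlt' | hge
        · exact ih2 j hj hlt'
        · have hje' : j = e := by omega
          subst hje'; rfl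
      · rw [hb', ha', hv]
        exact ih3
      · intro j ja hja hb hjlt
        rw [ha'] at hja; rw [hb'] at hb; rw [hv]
        exact ih4 j ja hja hb hjlt

theorem pv_b_dominates (nums : List Int) (e j1 j2 j3 : ℕ)
    (h12 : j1 < j2) (h23 : j2 < j3) (h3e : j3 ≤ e)
    (v12 : nums.getD j1 0 ≠ nums.getD j2 0) (v13 : nums.getD j1 0 ≠ nums.getD j3 0)
    (v23 : nums.getD j2 0 ≠ nums.getD j3 0) :
    (j1 : Int) ≤ (pvAb nums e).2 := by
  obtain ⟨inv1, inv2, inv3, inv4⟩ := pv_ab_inv nums e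
  by_contra hcon
  push_neg at hcon
  have hup : ∀ j : ℕ, (pvAb nums e).1 < (j : Int) → j ≤ e → nums.getD j 0 = nums.getD e 0 := by
    intro j hj hje
    rcases Nat.lt_or_ge j e with h | h
    · exact inv2 j hj h
    · have hje' : j = e := by omega
      subst hje'; rfl
  have hj1a : (j1 : Int) ≤ (pvAb nums e).1 := by
    by_contra hja
    push_neg at hja
    have e1 := hup j1 hja (by omega)
    have e2 := hup j2 (by omega) (by omega)
    exact v12 (by rw [e1, e2])
  have hane : (pvAb nums e).1 ≠ -1 := by omega
  rcases inv1 with h | ⟨ja, hja, hlta, hnea⟩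
  · exact hane h
  have hcol : ∀ j : ℕ, (pvAb nums e).2 < (j : Int) → j ≤ e →
      nums.getD j 0 = nums.getD e 0 ∨ nums.getD j 0 = nums.getD ja 0 := by
    intro j hbj hje
    rcases lt_trichotomy (j : Int) (pvAb nums e).1 with h | h | h
    · exact inv4 j ja hja hbj (by rw [hja] at h; exact_mod_cast h)
    · right
      rw [hja] at h
      have hjja : j = ja := by exact_mod_cast h
      rw [hjja]
    · left; exact hup j h hje
  have c1 := hcol j1 hcon (by omega)
  have c2 := hcol j2 (by omega) (by omega)
  have c3 := hcol j3 (by omega) h3e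
  rcases c1 with u1 | u1 <;> rcases c2 with u2 | u2 <;> rcases c3 with u3 | u3 <;> simp_all

-- ---------- properties of pvFirst / pvMu ----------

theorem pv_three_not_in_two (s : List Int) (v1 v2 v3 : Int) (hs : s.length ≤ 2)
    (h1 : v1 ∈ s) (h2 : v2 ∈ s) (h3 : v3 ∈ s)
    (d12 : v1 ≠ v2) (d13 : v1 ≠ v3) (d23 : v2 ≠ v3) : False := by
  rcases s with _ | ⟨a, _ | ⟨b, _ | ⟨c, t⟩⟩⟩ <;> simp_all
  rcases h1 with rfl | rfl <;> rcases h2 with rfl | rfl <;> rcases h3 with rfl | rfl <;> simp_all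

theorem pv_mem_shift (x v : Int) (xs : List Int) (m' : ℕ)
    (h : ∃ p ≤ m' + 1, (x :: xs).getD p 0 = v) : v = x ∨ ∃ p ≤ m', xs.getD p 0 = v := by
  rcases h with ⟨p, hp, hv⟩
  rcases p with _ | p'
  · left; simpa using hv.symm
  · right; exact ⟨p', by omega, by simpa using hv⟩

theorem pv_mem_zero (x v : Int) (xs : List Int) (h : ∃ p ≤ 0, (x :: xs).getD p 0 = v) : v = x := by
  rcases h with ⟨p, hp, hv⟩
  have hp0 : p = 0 := by omega
  subst hp0; simpa using hv.symm

theorem pv_first_min :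
    ∀ (l seen : List Int) (m : ℕ) (v1 v2 v3 : Int),
    seen.Nodup → seen.length ≤ 2 → m < l.length →
    v1 ≠ v2 → v1 ≠ v3 → v2 ≠ v3 →
    (v1 ∈ seen ∨ ∃ p ≤ m, l.getD p 0 = v1) →
    (v2 ∈ seen ∨ ∃ p ≤ m, l.getD p 0 = v2) →
    (v3 ∈ seen ∨ ∃ p ≤ m, l.getD p 0 = v3) →
    ∃ e ≤ m, pvFirst seen l = some e := by
  intro l
  induction l with
  | nil => intro seen m v1 v2 v3 _ _ hm; simp at hm
  | cons x xs ih =>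
    intro seen m v1 v2 v3 hnd hlen hm d12 d13 d23 h1 h2 h3
    simp only [pvFirst]
    by_cases hx : x ∈ seen
    · rw [if_pos hx]
      rcases m with _ | m'
      · exfalso
        have g : ∀ v, (v ∈ seen ∨ ∃ p ≤ 0, (x :: xs).getD p 0 = v) → v ∈ seen := by
          intro v hv
          rcases hv with h | h
          · exact h
          · rw [pv_mem_zero x v xs h]; exact hx
        exact pv_three_not_in_two seen v1 v2 v3 hlen (g v1 h1) (g v2 h2) (g v3 h3) d12 d13 d23
      · have g : ∀ v, (v ∈ seen ∨ ∃ p ≤ m' + 1, (x :: xs).getD p 0 = v) →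
            (v ∈ seen ∨ ∃ p ≤ m', xs.getD p 0 = v) := by
          intro v hv
          rcases hv with h | h
          · exact Or.inl h
          · rcases pv_mem_shift x v xs m' h with rfl | h'
            · exact Or.inl hx
            · exact Or.inr h'
        have hm' : m' < xs.length := by simpa using hm
        obtain ⟨e, he, hfe⟩ := ih seen m' v1 v2 v3 hnd hlen hm' d12 d13 d23 (g v1 h1) (g v2 h2) (g v3 h3)
        exact ⟨e + 1, by omega, by rw [hfe]; rfl⟩
    · rw [if_neg hx]
      by_cases h2len : seen.length = 2
      · rw [if_pos h2len]; exact ⟨0, Nat.zero_le m, rfl⟩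
      · rw [if_neg h2len]
        have hnd' : (seen ++ [x]).Nodup := by simp [List.nodup_append, hnd]; intro a ha rfl; exact hx ha
        have hlen' : (seen ++ [x]).length ≤ 2 := by simp; omega
        rcases m with _ | m'
        · exfalso
          have g : ∀ v, (v ∈ seen ∨ ∃ p ≤ 0, (x :: xs).getD p 0 = v) → v ∈ seen ++ [x] := by
            intro v hv
            rcases hv with h | h
            · simp [h]
            · simp [pv_mem_zero x v xs h]
          exact pv_three_not_in_two (seen ++ [x]) v1 v2 v3 hlen' (g v1 h1) (g v2 h2) (g v3 h3) d12 d13 d23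
        · have g : ∀ v, (v ∈ seen ∨ ∃ p ≤ m' + 1, (x :: xs).getD p 0 = v) →
              (v ∈ seen ++ [x] ∨ ∃ p ≤ m', xs.getD p 0 = v) := by
            intro v hv
            rcases hv with h | h
            · exact Or.inl (by simp [h])
            · rcases pv_mem_shift x v xs m' h with rfl | h'
              · exact Or.inl (by simp)
              · exact Or.inr h'
          have hm' : m' < xs.length := by simpa using hm
          obtain ⟨e, he, hfe⟩ := ih (seen ++ [x]) m' v1 v2 v3 hnd' hlen' hm' d12 d13 d23 (g v1 h1) (g v2 h2) (g v3 h3)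
          exact ⟨e + 1, by omega, by rw [hfe]; rfl⟩

theorem pv_first_sound :
    ∀ (l seen : List Int) (e : ℕ), seen.Nodup → pvFirst seen l = some e →
    e < l.length ∧ ∃ t1 t2 : Int, t1 ≠ t2 ∧ l.getD e 0 ≠ t1 ∧ l.getD e 0 ≠ t2 ∧
      (t1 ∈ seen ∨ ∃ p < e, l.getD p 0 = t1) ∧ (t2 ∈ seen ∨ ∃ p < e, l.getD p 0 = t2) := by
  intro l
  induction l with
  | nil => intro seen e _ h; simp [pvFirst] at h
  | cons x xs ih =>
    intro seen e hnd h
    simp only [pvFirst] at h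
    by_cases hx : x ∈ seen
    · rw [if_pos hx] at h
      obtain ⟨e', he', rfl⟩ := Option.map_eq_some_iff.1 h
      obtain ⟨hlt, t1, t2, hne, hv1, hv2, m1, m2⟩ := ih seen e' hnd he'
      refine ⟨by simpa using Nat.succ_lt_succ hlt, t1, t2, hne, by simpa using hv1, by simpa using hv2, ?_, ?_⟩
      · rcases m1 with h' | ⟨p, hp, hv⟩
        · exact Or.inl h'
        · exact Or.inr ⟨p + 1, by omega, by simpa using hv⟩
      · rcases m2 with h' | ⟨p, hp, hv⟩
        · exact Or.inl h'
        · exact Or.inr ⟨p + 1, by omega, by simpa using hv⟩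
    · rw [if_neg hx] at h
      by_cases h2 : seen.length = 2
      · rw [if_pos h2] at h
        obtain rfl : (0 : ℕ) = e := by simpa using h
        rcases seen with _ | ⟨t1, _ | ⟨t2, _ | ⟨t3, r⟩⟩⟩ <;> simp at h2
        simp only [List.mem_cons, List.not_mem_nil, or_false, not_or] at hx
        simp only [List.nodup_cons, List.mem_cons, List.not_mem_nil, or_false] at hnd
        refine ⟨by simp, t1, t2, ?_, ?_, ?_, Or.inl (by simp), Or.inl (by simp)⟩
        · simpa using hnd.1
        · simpa using hx.1
        · simpa using hx.2
      · rw [if_neg h2] at h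
        obtain ⟨e', he', rfl⟩ := Option.map_eq_some_iff.1 h
        have hnd' : (seen ++ [x]).Nodup := by simp [List.nodup_append, hnd]; intro a ha rfl; exact hx ha
        obtain ⟨hlt, t1, t2, hne, hv1, hv2, m1, m2⟩ := ih (seen ++ [x]) e' hnd' he'
        refine ⟨by simpa using Nat.succ_lt_succ hlt, t1, t2, hne, by simpa using hv1, by simpa using hv2, ?_, ?_⟩
        · rcases m1 with h' | ⟨p, hp, hv⟩
          · rcases List.mem_append.1 h' with h'' | h''
            · exact Or.inl h''
            · exact Or.inr ⟨0, by omega, by simpa using (List.mem_singleton.1 h'').symm⟩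
          · exact Or.inr ⟨p + 1, by omega, by simpa using hv⟩
        · rcases m2 with h' | ⟨p, hp, hv⟩
          · rcases List.mem_append.1 h' with h'' | h''
            · exact Or.inl h''
            · exact Or.inr ⟨0, by omega, by simpa using (List.mem_singleton.1 h'').symm⟩
          · exact Or.inr ⟨p + 1, by omega, by simpa using hv⟩

theorem pv_getD_drop (nums : List Int) (s p : ℕ) (h : p < nums.length - s) :
    (nums.drop s).getD p 0 = nums.getD (s + p) 0 := by
  have h1 : p < (nums.drop s).length := by simp; omega
  have h2 : s + p < nums.length := by omega
  rw [List.getD_eq_getElem _ _ h1, List.getD_eq_getElem _ _ h2, List.getElem_drop]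

theorem pv_mu_sound (nums : List Int) (k E : ℕ) (hk : k < nums.length) (h : pvMu nums k = some E) :
    ∃ j1 j2 j3 : ℕ, k ≤ j1 ∧ j1 < j2 ∧ j2 < j3 ∧ j3 = E ∧ E < nums.length ∧
      nums.getD j1 0 ≠ nums.getD j2 0 ∧ nums.getD j1 0 ≠ nums.getD j3 0 ∧
      nums.getD j2 0 ≠ nums.getD j3 0 := by
  unfold pvMu at h
  obtain ⟨e, hfe, hE⟩ := Option.map_eq_some_iff.1 h
  obtain ⟨hlt, t1, t2, hne, hv1, hv2, m1, m2⟩ :=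
    pv_first_sound (nums.drop (k + 1)) [nums.getD k 0] e (by simp) hfe
  have hdl : (nums.drop (k + 1)).length = nums.length - (k + 1) := by simp
  have hEn : E < nums.length := by omega
  have hVE : (nums.drop (k + 1)).getD e 0 = nums.getD E 0 := by
    rw [pv_getD_drop nums (k + 1) e (by omega), hE]
  have getq : ∀ t, (t ∈ [nums.getD k 0] ∨ ∃ p < e, (nums.drop (k + 1)).getD p 0 = t) →
      ∃ q, k ≤ q ∧ q < E ∧ nums.getD q 0 = t := by
    intro t ht
    rcases ht with ht | ⟨p, hp, ht⟩
    · exact ⟨k, le_refl k, by omega, (List.mem_singleton.1 ht).symm⟩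
    · refine ⟨k + 1 + p, by omega, by omega, ?_⟩
      rw [← ht, pv_getD_drop nums (k + 1) p (by omega)]
  obtain ⟨q1, hq1k, hq1E, hq1v⟩ := getq t1 m1
  obtain ⟨q2, hq2k, hq2E, hq2v⟩ := getq t2 m2
  have hE1 : nums.getD E 0 ≠ t1 := by rw [← hVE]; exact hv1
  have hE2 : nums.getD E 0 ≠ t2 := by rw [← hVE]; exact hv2
  rcases Nat.lt_or_ge q1 q2 with hlt' | hge
  · refine ⟨q1, q2, E, hq1k, hlt', hq2E, rfl, hEn, ?_, ?_, ?_⟩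
    · rw [hq1v, hq2v]; exact hne
    · rw [hq1v]; exact fun hh => hE1 hh.symm
    · rw [hq2v]; exact fun hh => hE2 hh.symm
  · have hlt'' : q2 < q1 := by
      rcases Nat.eq_or_lt_of_le hge with heq | hlt''
    -- q1 = q2 impossible: values differ
      · exact absurd (by rw [← hq1v, ← hq2v, heq]) hne
      · exact hlt''
    refine ⟨q2, q1, E, hq2k, hlt'', hq1E, rfl, hEn, ?_, ?_, ?_⟩
    · rw [hq1v, hq2v]; exact fun hh => hne hh.symm
    · rw [hq2v]; exact fun hh => hE2 hh.symm
    · rw [hq1v]; exact fun hh => hE1 hh.symm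

theorem pv_mu_min (nums : List Int) (k j1 j2 j3 : ℕ)
    (hk : k ≤ j1) (h12 : j1 < j2) (h23 : j2 < j3) (h3n : j3 < nums.length)
    (v12 : nums.getD j1 0 ≠ nums.getD j2 0) (v13 : nums.getD j1 0 ≠ nums.getD j3 0)
    (v23 : nums.getD j2 0 ≠ nums.getD j3 0) :
    ∃ E, pvMu nums k = some E ∧ E ≤ j3 := by
  have hk3 : k + 1 < j3 := by omega
  have hmlt : j3 - (k + 1) < (nums.drop (k + 1)).length := by simp; omega
  have mem : ∀ j, k ≤ j → j ≤ j3 →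
      (nums.getD j 0 ∈ [nums.getD k 0] ∨
        ∃ p ≤ j3 - (k + 1), (nums.drop (k + 1)).getD p 0 = nums.getD j 0) := by
    intro j hjk hj3
    rcases Nat.eq_or_lt_of_le hjk with heq | hltj
    · left; rw [← heq]; simp
    · right
      refine ⟨j - (k + 1), by omega, ?_⟩
      rw [pv_getD_drop nums (k + 1) _ (by omega)]; congr 1; omega
  obtain ⟨e, he, hfe⟩ := pv_first_min (nums.drop (k + 1)) [nums.getD k 0] (j3 - (k + 1))
    (nums.getD j1 0) (nums.getD j2 0) (nums.getD j3 0) (by simp) (by simp) hmlt v12 v13 v23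
    (mem j1 hk (by omega)) (mem j2 (by omega) (by omega)) (mem j3 (by omega) le_rfl)
  refine ⟨k + 1 + e, ?_, by omega⟩
  unfold pvMu; rw [hfe]; rfl

-- ===== VERDICT (by name: the statement is the Claim_ definition above) =====
theorem BrF_spec : Claim_equal_BrF := by
  intro nums _
  unfold Spec_BrF
  rw [pv_A_char, pv_B_char]
  set n := nums.length with hn
  set FA := (List.range' 0 (n - 2)).foldl (pvCMin (pvCandA nums)) 99999 with hFA
  set FB := (List.range' 1 (n - 1)).foldl (pvCMin (pvCandB nums)) 100000 with hFB
  apply le_antisymm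
  · -- FA + 1 ≤ FB
    rcases pv_cmin_attained (pvCandB nums) (List.range' 1 (n - 1)) 100000 with h | ⟨e, he, v, hcv, hv⟩
    · have hle := pv_cmin_le_start (pvCandA nums) (List.range' 0 (n - 2)) 99999
      rw [← hFA] at hle; rw [← hFB] at h; omega
    · rw [← hFB] at hv
      obtain ⟨h1e, hen⟩ := List.mem_range'_1.1 he
      have hb : ¬ (pvAb nums e).2 = -1 ∧ v = (e : Int) - (pvAb nums e).2 + 1 := by
        unfold pvCandB at hcv
        split at hcv
        · exact absurd hcv (by simp)
        · exact ⟨by assumption, by injection hcv with hh; omega⟩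
      obtain ⟨hbne, hveq⟩ := hb
      obtain ⟨inv1, _, inv3, _⟩ := pv_ab_inv nums e
      rcases inv3 with h' | ⟨jb, ja, hja, hjb, hlt3, hne3a, hne3b⟩
      · exact absurd h' hbne
      rcases inv1 with h' | ⟨ja', hja', hlta, hnea⟩
      · rw [h'] at hja; omega
      have hjaeq : ja' = ja := by exact_mod_cast hja'.symm.trans hja
      rw [hjaeq] at hlta hnea
      obtain ⟨E, hmu, hEe⟩ := pv_mu_min nums jb jb ja e le_rfl hlt3 hlta (by omega)
        hne3b hne3a hnea
      have hca : pvCandA nums jb = some ((E : Int) - (jb : ℕ)) := by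
        unfold pvCandA; rw [hmu]; rfl
      have hfa := pv_cmin_le_cand (pvCandA nums) (List.range' 0 (n - 2)) 99999 jb _
        (List.mem_range'_1.2 ⟨by omega, by omega⟩) hca
      rw [← hFA] at hfa
      omega
  · -- FB ≤ FA + 1
    rcases pv_cmin_attained (pvCandA nums) (List.range' 0 (n - 2)) 99999 with h | ⟨k, hk, v, hcv, hv⟩
    · have hle := pv_cmin_le_start (pvCandB nums) (List.range' 1 (n - 1)) 100000
      rw [← hFB] at hle; rw [← hFA] at h; omega
    · rw [← hFA] at hv
      obtain ⟨h0k, hkn⟩ := List.mem_range'_1.1 hk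
      have hE : ∃ E, pvMu nums k = some E ∧ v = (E : Int) - (k : ℕ) := by
        unfold pvCandA at hcv
        cases hmu : pvMu nums k with
        | none => rw [hmu] at hcv; exact absurd hcv (by simp)
        | some E =>
          rw [hmu] at hcv
          exact ⟨E, rfl, by injection hcv with hh; simp at hh; omega⟩
      obtain ⟨E, hmu, hveq⟩ := hE
      obtain ⟨j1, j2, j3, hkj1, h12, h23, rfl, hEn, d12, d13, d23⟩ :=
        pv_mu_sound nums k E (by omega) hmu
      have hdom := pv_b_dominates nums j3 j1 j2 j3 h12 h23 le_rfl d12 d13 d23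
      have hcb : pvCandB nums j3 = some ((j3 : Int) - (pvAb nums j3).2 + 1) := by
        unfold pvCandB; rw [if_neg (by omega)]
      have hfb := pv_cmin_le_cand (pvCandB nums) (List.range' 1 (n - 1)) 100000 j3 _
        (List.mem_range'_1.2 ⟨by omega, by omega⟩) hcb
      rw [← hFB] at hfb
      omega
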